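-- pv_equiv track=rewrite | github.com/johagg17/Master-thesis | utils/functions.py | index_seq
-- ===== SOURCE A (Python) =====
-- def index_seq(tokens, symbol='[SEP]'):
--     """
--     Used to tell which sentence a specific token belongs to
--     """
--     flag = 0
--     seg = []
--
--     for token in tokens:
--         if token == symbol:
--             seg.append(flag)
--             if flag == 0:
--                 flag = 1
--             else:
--                 flag = 0
--         else:
--             seg.append(flag)
--     return seg
-- ===== SOURCE B (Python) =====
-- def index_seq(tokens, symbol='[SEP]'):
--     """
--     Used to tell which sentence a specific token belongs to
--     """
--     # Block-wise: repeatedly search for the next separator and emit a whole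
--     # run of identical segment ids up to and including it, then flip the id.
--     seg = []
--     rest = tokens
--     flag = 0
--     while symbol in rest:
--         j = rest.index(symbol)
--         seg.extend([flag] * (j + 1))
--         rest = rest[j + 1:]
--         flag = 1 - flag
--     seg.extend([flag] * len(rest))
--     return seg
-- ===== Notes on version B (the rewrite author's own statement) =====
-- stated objective: alternative
-- what changed: Replaces the per-token toggling-flag traversal by a block-emitting loop: repeatedly find the next separator with list.index, emit a whole run of identical segment ids up to and including it via list multiplication, slice off that block and flip the id.
import Mathlib
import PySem

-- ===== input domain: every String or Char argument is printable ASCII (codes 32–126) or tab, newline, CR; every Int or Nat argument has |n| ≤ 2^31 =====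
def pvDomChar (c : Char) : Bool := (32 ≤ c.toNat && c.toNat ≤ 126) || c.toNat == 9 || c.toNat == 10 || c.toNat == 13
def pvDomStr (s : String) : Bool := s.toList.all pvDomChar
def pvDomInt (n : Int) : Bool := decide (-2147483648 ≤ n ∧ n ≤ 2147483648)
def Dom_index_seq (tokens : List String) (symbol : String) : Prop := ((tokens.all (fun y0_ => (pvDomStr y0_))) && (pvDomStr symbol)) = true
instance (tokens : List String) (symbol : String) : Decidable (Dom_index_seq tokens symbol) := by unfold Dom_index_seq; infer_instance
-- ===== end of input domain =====

-- B replaces A's per-token toggling-flag traversal by block emission: it repeatedly searches for the next separator and emits a whole run of identical segment ids (alternative decomposition, same cost).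


-- ===== PORT A =====
-- flag starts at 0; each token appends the current flag, and a separator toggles the flag afterwards
def index_seq (tokens : List String) (symbol : String) : List Int :=
  (tokens.foldl
    (fun (st : Int × List Int) token =>
      if token == symbol then
        (st.2 ++ [st.1], if st.1 == 0 then (1 : Int) else 0).swap
      else
        (st.1, st.2 ++ [st.1]))
    (0, [])).2

-- ===== PORT B =====
-- the while loop of Source B: while the symbol occurs in the remainder, emit a run of
-- (index + 1) copies of the flag, drop that block, flip the flag; finally emit the tail
def pvBlocks (rest : List String) (symbol : String) (flag : Int) : List Int :=
  match h : PySem.List.index? rest symbol with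
  | some j => List.replicate (j + 1) flag ++ pvBlocks (rest.drop (j + 1)) symbol (1 - flag)
  | none => List.replicate rest.length flag
termination_by rest.length
decreasing_by
  obtain ⟨hk, _, _⟩ := PySem.List.getElem_of_index?_eq_some h
  simp only [List.length_drop]; omega

def index_seq_alt (tokens : List String) (symbol : String) : List Int :=
  pvBlocks tokens symbol 0

-- ===== PRECONDITION & SPEC =====
def Spec_index_seq (tokens : List String) (symbol : String) (out : List Int) : Prop := out = index_seq_alt tokens symbol
instance (tokens : List String) (symbol : String) (out : List Int) : Decidable (Spec_index_seq tokens symbol out) := by unfold Spec_index_seq; infer_instance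

-- ===== CLAIM (what is proved, stated in full; the proofs are below) =====
def Claim_equal_index_seq : Prop := ∀ (tokens : List String) (symbol : String), Dom_index_seq tokens symbol → Spec_index_seq tokens symbol (index_seq tokens symbol)

-- ===== LEMMAS AND PROOFS =====

-- A's loop over a stretch with no separator just appends the flag once per token
lemma foldl_no_sep (symbol : String) (pre : List String) (hpre : symbol ∉ pre) :
    ∀ (f : Int) (acc : List Int),
      pre.foldl
        (fun (st : Int × List Int) token =>
          if token == symbol then
            (st.2 ++ [st.1], if st.1 == 0 then (1 : Int) else 0).swap
          else
            (st.1, st.2 ++ [st.1]))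
        (f, acc) = (f, acc ++ List.replicate pre.length f) := by
  induction pre with
  | nil => intro f acc; simp
  | cons t ts ih =>
    intro f acc
    have ht : (t == symbol) = false := by
      simp only [List.mem_cons, not_or] at hpre
      simp [beq_eq_false_iff_ne]; exact fun h => hpre.1 h.symm
    have hts : symbol ∉ ts := by simp only [List.mem_cons, not_or] at hpre; exact hpre.2
    rw [List.foldl_cons]
    simp only [ht, Bool.false_eq_true, if_false]
    rw [ih hts f (acc ++ [f])]
    simp [List.replicate_succ]

lemma index_seq_loop (symbol : String) :
    ∀ (n : ℕ) (rest : List String), rest.length ≤ n → ∀ (f : Int), (f = 0 ∨ f = 1) →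
      ∀ (acc : List Int),
      (rest.foldl
        (fun (st : Int × List Int) token =>
          if token == symbol then
            (st.2 ++ [st.1], if st.1 == 0 then (1 : Int) else 0).swap
          else
            (st.1, st.2 ++ [st.1]))
        (f, acc)).2 = acc ++ pvBlocks rest symbol f := by
  intro n
  induction n with
  | zero =>
    intro rest hlen f _ acc
    have : rest = [] := List.eq_nil_of_length_eq_zero (by omega)
    subst this; simp [pvBlocks]
  | succ n ih =>
    intro rest hlen f hf acc
    rw [pvBlocks]
    cases h : PySem.List.index? rest symbol with
    | none =>
      have hns : symbol ∉ rest := (PySem.List.index?_eq_none_iff _ _).1 h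
      simp only []
      rw [foldl_no_sep symbol rest hns f acc]
    | some j =>
      obtain ⟨pre, suf, hsplit, hlen', hns⟩ := (PySem.List.index?_eq_some_iff _ _ _).1 h
      subst hsplit
      have hdrop : (pre ++ symbol :: suf).drop (j + 1) = suf := by
        subst hlen'
        simp [List.drop_append_of_le_length]
      have htog : (if f == 0 then (1 : Int) else 0) = 1 - f := by
        rcases hf with rfl | rfl <;> simp
      rw [List.foldl_append]
      rw [foldl_no_sep symbol pre hns f acc]
      simp only [List.foldl_cons, beq_self_eq_true, if_true, Prod.swap_prod_mk]
      have hlen2 : suf.length ≤ n := by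
        simp only [List.length_append, List.length_cons] at hlen; omega
      have := ih suf hlen2 (1 - f) (by rcases hf with rfl | rfl <;> simp) (acc ++ List.replicate pre.length f ++ [f])
      simp only [htog] at this ⊢
      simp only [Prod.swap_prod_mk] at this
      rw [hdrop, this, hlen']
      simp [List.replicate_succ', List.append_assoc]

-- ===== VERDICT (by name: the statement is the Claim_ definition above) =====
theorem index_seq_spec : Claim_equal_index_seq := by
  intro tokens symbol _
  unfold Spec_index_seq index_seq index_seq_alt
  simpa using index_seq_loop symbol tokens.length tokens le_rfl 0 (Or.inl rfl) []
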